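-- pv_equiv track=rewrite | github.com/sbelsky01/AoC2023 | day3/solution.py | right_string
-- ===== SOURCE A (Python) =====
-- def remove_num(data, row, col):
--     data[row]=data[row][:col]+'.'+data[row][col+1:]
--
-- def right_string(data, row, col):
--     if col>=len(data[row]):
--         return ''
--     char = data[row][col]
--     if not char.isnumeric():
--         return ''
--     remove_num(data, row, col)
--     return char+right_string(data, row, col+1)
-- ===== SOURCE B (Python) =====
-- def right_string(data, row, col):
--     s = data[row]
--     end = col
--     while end < len(s) and s[end].isnumeric():
--         end += 1
--     run = s[col:end]
--     if run:
--         data[row] = s[:col] + '.' * len(run) + s[end:]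
--     return run
-- ===== Notes on version B (the rewrite author's own statement) =====
-- stated objective: simpler
-- what changed: A collects the run by per-digit recursion, rebuilding the whole row string once per collected digit; B finds the end of the digit run with one forward scan, returns one slice and replaces the run with dots in a single splice.
-- outside the precondition, e.g. on right_string(['25'], 0, -1): A returns '52', B returns '5'
import Mathlib
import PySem

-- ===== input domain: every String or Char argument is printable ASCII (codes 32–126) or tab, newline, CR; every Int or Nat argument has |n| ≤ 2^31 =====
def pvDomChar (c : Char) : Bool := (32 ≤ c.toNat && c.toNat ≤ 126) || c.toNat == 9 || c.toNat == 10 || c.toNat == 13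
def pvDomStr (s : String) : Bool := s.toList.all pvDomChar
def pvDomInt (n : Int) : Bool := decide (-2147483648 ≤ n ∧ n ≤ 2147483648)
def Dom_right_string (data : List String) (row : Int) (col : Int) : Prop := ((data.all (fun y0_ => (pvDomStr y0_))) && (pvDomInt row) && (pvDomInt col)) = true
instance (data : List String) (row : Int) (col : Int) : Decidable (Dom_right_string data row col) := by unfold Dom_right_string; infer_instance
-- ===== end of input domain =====

-- B replaces A's per-digit recursion (one full string rebuild per collected digit) by a single
-- forward scan plus one slice and one replacement; objective: simpler (not measurably faster
-- on the timed inputs). Both A and B mutate data[row] in place in Python (identically, inside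
-- Pre_); the Lean ports and the equivalence proved here are about the RETURN value only.

-- ===== PORT A =====
-- char.isnumeric(): on the printable-ASCII domain Dom this is exactly isdigit (exact there).
-- The fuel argument is a totality guard only: it is never exhausted when 0 ≤ col (Pre_).
def right_string_go (fuel : Nat) (data : List String) (row : Int) (col : Int) : String :=
  match fuel with
  | 0 => ""
  | fuel + 1 =>
    match PySem.List.pyGet? data row with
    | none => ""          -- Python: data[row] raises IndexError; excluded by Pre_
    | some s =>
      let cs := s.toList
      if (cs.length : Int) ≤ col then ""            -- col >= len(data[row])
      else
        match PySem.List.pyGet? cs col with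
        | none => ""      -- Python: data[row][col] raises IndexError; excluded by Pre_
        | some c =>
          if ¬ PySem.Chars.isdigit c then ""        -- not char.isnumeric()
          else
            -- remove_num: data[row] = data[row][:col] + '.' + data[row][col+1:]
            let ns := String.ofList (PySem.List.slice cs none (some col) ++ ['.'] ++
                                     PySem.List.slice cs (some (col + 1)) none)
            let data' := PySem.List.pySetD data row ns
            String.ofList (c :: (right_string_go fuel data' row (col + 1)).toList)

def right_string (data : List String) (row : Int) (col : Int) : String :=
  right_string_go
    (match PySem.List.pyGet? data row with
     | some s => s.toList.length + 1
     | none => 1)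
    data row col

-- ===== PORT B =====
-- while end < len(s) and s[end].isnumeric(): end += 1      (isnumeric = isdigit on Dom)
def right_string_scanEnd (cs : List Char) (e : Int) : Int :=
  if _h : e < (cs.length : Int) then
    match PySem.List.pyGet? cs e with
    | some c => if PySem.Chars.isdigit c then right_string_scanEnd cs (e + 1) else e
    | none => e           -- Python: s[end] raises IndexError; excluded by Pre_
  else e
termination_by ((cs.length : Int) - e).toNat
decreasing_by omega

def right_string_alt (data : List String) (row : Int) (col : Int) : String :=
  match PySem.List.pyGet? data row with
  | none => ""            -- Python: data[row] raises IndexError; excluded by Pre_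
  | some s =>
    let cs := s.toList
    let e := right_string_scanEnd cs col
    String.ofList (PySem.List.slice cs (some col) (some e))     -- run = s[col:end]

-- ===== PRECONDITION & SPEC =====
-- Pre_ excludes (a) row not a valid Python index of data, where A raises IndexError, and
-- (b) col < 0, where A's value is an accident of negative-index wraparound combined with
-- remove_num's splice corrupting the row (at col = -1 it splices the whole row back in),
-- e.g. A returns "52" on (["25"], 0, -1) where B returns "5".
def Pre_right_string (data : List String) (row : Int) (col : Int) : Prop :=
  PySem.Raise.InRange data.length row ∧ 0 ≤ col
instance (data : List String) (row : Int) (col : Int) : Decidable (Pre_right_string data row col) := by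
  unfold Pre_right_string; infer_instance

def pvWitness_right_string : List String × Int × Int := (["4a12", "x3"], 0, 0)

def Spec_right_string (data : List String) (row : Int) (col : Int) (out : String) : Prop := out = right_string_alt data row col
instance (data : List String) (row : Int) (col : Int) (out : String) : Decidable (Spec_right_string data row col out) := by unfold Spec_right_string; infer_instance

-- ===== CLAIM (what is proved, stated in full; the proofs are below) =====
def Claim_equal_right_string : Prop := ∀ (data : List String) (row : Int) (col : Int), Dom_right_string data row col → Pre_right_string data row col → Spec_right_string data row col (right_string data row col)

-- ===== LEMMAS AND PROOFS =====

-- a valid (possibly negative) Python index i into xs reads / writes the normalised slot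
theorem pyGet_norm {α : Type} (xs : List α) (i : Int) (h : PySem.Raise.InRange xs.length i) :
    PySem.List.pyGet? xs i = xs[(if i < 0 then i + xs.length else i).toNat]? := by
  unfold PySem.List.pyGet? PySem.List.pyIdx?
  unfold PySem.Raise.InRange at h
  split_ifs with h1 h2 h3 <;> simp <;> first | rfl | omega | (congr 1; omega)

theorem pySetD_norm {α : Type} (xs : List α) (i : Int) (v : α) (h : PySem.Raise.InRange xs.length i) :
    PySem.List.pySetD xs i v = xs.set (if i < 0 then i + xs.length else i).toNat v := by
  unfold PySem.List.pySetD PySem.List.pySet? PySem.List.pyIdx?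
  unfold PySem.Raise.InRange at h
  split_ifs with h1 h2 h3 <;> simp <;> first | rfl | omega | (congr 1; omega)

-- the value both ports compute: the maximal digit run of cs starting at index c
def digitRun (cs : List Char) (c : Nat) : List Char :=
  (cs.drop c).takeWhile PySem.Chars.isdigit

theorem scanEnd_spec (cs : List Char) (e : Int) (he : 0 ≤ e) :
    right_string_scanEnd cs e = e + (digitRun cs e.toNat).length := by
  fun_induction right_string_scanEnd cs e with
  | case1 e h c hget hdig ih =>
    rw [ih (by omega)]
    have hlt : e.toNat < cs.length := by omega
    rw [PySem.List.pyGet?_of_nonneg (h := he)] at hget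
    obtain ⟨hlt', hc⟩ := List.getElem?_eq_some_iff.mp hget
    unfold digitRun
    rw [← List.getElem_cons_drop (as := cs) (i := e.toNat) (h := hlt), hc,
        List.takeWhile_cons, if_pos hdig]
    have h1 : (e + 1).toNat = e.toNat + 1 := by omega
    simp [h1]
    omega
  | case2 e h c hget hdig =>
    have hlt : e.toNat < cs.length := by omega
    rw [PySem.List.pyGet?_of_nonneg (h := he)] at hget
    obtain ⟨hlt', hc⟩ := List.getElem?_eq_some_iff.mp hget
    unfold digitRun
    rw [← List.getElem_cons_drop (as := cs) (i := e.toNat) (h := hlt), hc,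
        List.takeWhile_cons, if_neg hdig]
    simp
  | case3 e h hget =>
    rw [PySem.List.pyGet?_of_nonneg (h := he)] at hget
    simp at hget
    omega
  | case4 e h =>
    unfold digitRun
    rw [List.drop_eq_nil_of_le (by omega)]
    simp

theorem alt_spec (data : List String) (row col : Int) (s : String)
    (hs : PySem.List.pyGet? data row = some s) (hc : 0 ≤ col) :
    right_string_alt data row col = String.ofList (digitRun s.toList col.toNat) := by
  unfold right_string_alt
  rw [hs]
  simp only
  rw [scanEnd_spec _ _ hc,
      PySem.List.slice_toNat (ha := hc) (hb := by positivity)]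
  congr 1
  have h1 : (col + ((digitRun s.toList col.toNat).length : Int)).toNat - col.toNat
      = (digitRun s.toList col.toNat).length := by omega
  rw [h1]
  exact (List.prefix_iff_eq_take.mp (List.takeWhile_prefix _)).symm

set_option maxHeartbeats 1000000 in
theorem go_spec (fuel : Nat) (data : List String) (row col : Int) (s : String)
    (hs : PySem.List.pyGet? data row = some s) (hc : 0 ≤ col)
    (hf : s.toList.length < fuel + col.toNat) :
    right_string_go fuel data row col = String.ofList (digitRun s.toList col.toNat) := by
  induction fuel generalizing data col s with
  | zero =>
    unfold right_string_go digitRun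
    rw [List.drop_eq_nil_of_le (by omega)]
    simp
  | succ fuel ih =>
    unfold right_string_go
    rw [hs]
    simp only
    by_cases hlen : (s.toList.length : Int) ≤ col
    · rw [if_pos hlen]
      unfold digitRun
      rw [List.drop_eq_nil_of_le (by omega)]
      simp
    · rw [if_neg hlen]
      have hlt : col.toNat < s.toList.length := by omega
      rw [PySem.List.pyGet?_of_nonneg (h := hc)]
      rw [List.getElem?_eq_getElem hlt]
      simp only
      set c := s.toList[col.toNat] with hcdef
      have hdrop : s.toList.drop col.toNat = c :: s.toList.drop (col.toNat + 1) :=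
        (List.getElem_cons_drop (as := s.toList) (i := col.toNat) (h := hlt)).symm
      by_cases hdig : PySem.Chars.isdigit c
      · rw [if_neg (by simp [hdig])]
        -- the mutated row
        set ns := String.ofList (PySem.List.slice s.toList none (some col) ++ ['.'] ++
                                 PySem.List.slice s.toList (some (col + 1)) none) with hns
        have hr : PySem.Raise.InRange data.length row := by
          by_contra hnr
          rw [(PySem.List.pyGet?_eq_none_iff data row).mpr hnr] at hs
          simp at hs
        set r := (if row < 0 then row + data.length else row).toNat with hrdef
        have hrlt : r < data.length := by
          rw [pyGet_norm data row hr] at hs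
          exact (List.getElem?_eq_some_iff.mp hs).1
        have hdata' : PySem.List.pySetD data row ns = data.set r ns :=
          pySetD_norm data row ns hr
        have hget' : PySem.List.pyGet? (data.set r ns) row = some ns := by
          have hr' : PySem.Raise.InRange (data.set r ns).length row := by
            simpa using hr
          rw [pyGet_norm _ row hr']
          simp [← hrdef, hrlt]
        have hk1 : (col + 1).toNat = col.toNat + 1 := by omega
        have hnslist : ns.toList = s.toList.take col.toNat ++ ['.'] ++
            s.toList.drop (col.toNat + 1) := by
          rw [hns]
          rw [PySem.List.slice_to (hb := hc), PySem.List.slice_from (ha := by omega), hk1]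
          simp
        have hnslen : ns.toList.length = s.toList.length := by
          rw [hnslist]
          simp only [List.length_append, List.length_take, List.length_drop,
            List.length_cons, List.length_nil]
          omega
        rw [hdata', ih (data.set r ns) (col + 1) ns hget' (by omega)
              (by rw [hnslen]; omega)]
        have hruns : digitRun ns.toList (col + 1).toNat = digitRun s.toList (col.toNat + 1) := by
          unfold digitRun
          rw [hk1, hnslist, List.drop_left'
            (by simp only [List.length_append, List.length_take, List.length_nil,
                  List.length_cons]; omega)]
        rw [hruns]
        have hrun : digitRun s.toList col.toNat = c :: digitRun s.toList (col.toNat + 1) := by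
          unfold digitRun
          rw [hdrop, List.takeWhile_cons, if_pos hdig]
        rw [hrun]
        simp
      · rw [if_pos (by simp [hdig])]
        unfold digitRun
        rw [hdrop, List.takeWhile_cons, if_neg (by simp [hdig])]

-- ===== VERDICT (by name: the statement is the Claim_ definition above) =====
theorem right_string_spec : Claim_equal_right_string := by
  intro data row col _ hpre
  obtain ⟨hr, hc⟩ := hpre
  have hsome : ∃ s, PySem.List.pyGet? data row = some s := by
    rw [pyGet_norm data row hr]
    unfold PySem.Raise.InRange at hr
    have : (if row < 0 then row + data.length else row).toNat < data.length := by
      split_ifs <;> omega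
    exact ⟨_, List.getElem?_eq_getElem this⟩
  obtain ⟨s, hs⟩ := hsome
  unfold Spec_right_string right_string
  rw [hs, alt_spec data row col s hs hc]
  show right_string_go (s.toList.length + 1) data row col = _
  rw [go_spec _ data row col s hs hc (by omega)]
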